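-- pv_equiv track=rewrite | github.com/Recursing/Advent-of-Code | Advent-of-Code-2025/day07.py | step
-- ===== SOURCE A (Python) =====
-- def step(prev_line: str, cur_line: str) -> tuple[str, int]:
--     beams_indexes = {i for i, c in enumerate(prev_line) if c in "|S"}
--     num_splits = sum(cur_line[i] == "^" for i in beams_indexes)
--
--     new_line = "".join(
--         "|"
--         if c == "."
--         and (
--             i in beams_indexes
--             or ((i + 1) in beams_indexes and cur_line[i + 1] == "^")
--             or ((i - 1) in beams_indexes and cur_line[i - 1] == "^")
--         )
--         else c
--         for i, c in enumerate(cur_line)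
--     )
--     return new_line, num_splits
-- ===== SOURCE B (Python) =====
-- def step(prev_line: str, cur_line: str) -> tuple[str, int]:
--     # Streaming pass with delayed emission: a rolling window of three pending
--     # flags (marks for cells i-1, i, i+1) replaces any precomputed index set.
--     n, m = len(prev_line), len(cur_line)
--     out = []
--     num_splits = 0
--     t0 = t1 = t2 = False  # pending beam marks for cells i-1, i, i+1
--     for i in range(max(n, m) + 1):
--         if i < n and prev_line[i] in "|S":
--             if cur_line[i] == "^":
--                 num_splits += 1
--                 t0 = True
--                 t2 = True
--             t1 = True
--         if 1 <= i <= m: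
--             c = cur_line[i - 1]
--             out.append("|" if c == "." and t0 else c)
--         t0, t1, t2 = t1, t2, False
--     return "".join(out), num_splits
-- ===== Notes on version B (the rewrite author's own statement) =====
-- stated objective: alternative
-- what changed: Replaces A's beam-index set and per-cell backward membership/neighbor lookups with a single fused streaming loop that keeps only a rolling window of three pending mark flags (for cells i-1, i, i+1) and emits each output cell one step delayed, counting splits in the same pass; no index set is ever materialized.
import Mathlib
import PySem

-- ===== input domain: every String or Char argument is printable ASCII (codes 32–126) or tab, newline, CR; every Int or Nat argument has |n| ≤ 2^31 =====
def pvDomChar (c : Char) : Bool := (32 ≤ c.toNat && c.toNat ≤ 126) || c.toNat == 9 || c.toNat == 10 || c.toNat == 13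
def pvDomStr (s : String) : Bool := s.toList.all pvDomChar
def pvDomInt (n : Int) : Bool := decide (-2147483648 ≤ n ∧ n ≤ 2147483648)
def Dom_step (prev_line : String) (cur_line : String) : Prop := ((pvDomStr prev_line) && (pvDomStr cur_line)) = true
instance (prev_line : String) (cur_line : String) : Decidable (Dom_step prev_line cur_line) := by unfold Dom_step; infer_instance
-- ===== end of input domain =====

-- B replaces A's beam-index set and per-cell membership lookups by a single streaming pass with
-- delayed emission and a rolling window of three pending flags (alternative decomposition, same cost).

-- ===== PORT A =====
def step (prev_line : String) (cur_line : String) : String × Int :=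
  let cl := cur_line.toList
  let beams : PySem.Set Int :=
    PySem.Set.ofList ((PySem.List.enumerate prev_line.toList 0).filterMap
      (fun p => if p.2 == '|' || p.2 == 'S' then some p.1 else none))
  let numSplits : Int :=
    beams.foldl (fun acc i => acc + (if PySem.List.pyGetD cl i ' ' == '^' then 1 else 0)) 0
  let newLine : List Char :=
    (PySem.List.enumerate cl 0).map (fun p =>
      if p.2 == '.' &&
         (PySem.Set.contains beams p.1 ||
          (PySem.Set.contains beams (p.1 + 1) && PySem.List.pyGetD cl (p.1 + 1) ' ' == '^') ||
          (PySem.Set.contains beams (p.1 - 1) && PySem.List.pyGetD cl (p.1 - 1) ' ' == '^'))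
      then '|' else p.2)
  (String.ofList newLine, numSplits)

-- ===== PORT B =====
-- one iteration of Source B's loop; state = (out, num_splits, t0, t1, t2)
def stepBLoop (pl cl : List Char) (s : List Char × Int × Bool × Bool × Bool) (i : Int) :
    List Char × Int × Bool × Bool × Bool :=
  let out := s.1
  let splits := s.2.1
  let t0 := s.2.2.1
  let t1 := s.2.2.2.1
  let t2 := s.2.2.2.2
  let r :=
    if decide (i < (pl.length : Int)) &&
       (PySem.List.pyGetD pl i ' ' == '|' || PySem.List.pyGetD pl i ' ' == 'S') then
      if PySem.List.pyGetD cl i ' ' == '^' then (splits + 1, true, true, true)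
      else (splits, t0, true, t2)
    else (splits, t0, t1, t2)
  let out :=
    if decide (1 ≤ i) && decide (i ≤ (cl.length : Int)) then
      let c := PySem.List.pyGetD cl (i - 1) ' '
      out ++ [if c == '.' && r.2.1 then '|' else c]
    else out
  (out, r.1, r.2.2.1, r.2.2.2, false)

def step_alt (prev_line : String) (cur_line : String) : String × Int :=
  let pl := prev_line.toList
  let cl := cur_line.toList
  let r := (PySem.List.pyRange 0 (max (pl.length : Int) (cl.length : Int) + 1) 1).foldl
    (stepBLoop pl cl) ([], 0, false, false, false)
  (String.ofList r.1, r.2.1)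

-- ===== PRECONDITION & SPEC =====
-- Pre_step excludes exactly the inputs where Python A raises IndexError: a beam ('|' or 'S')
-- in prev_line at an index that is not a valid index of cur_line.
def Pre_step (prev_line : String) (cur_line : String) : Prop :=
  ∀ p ∈ PySem.List.enumerate prev_line.toList 0,
    (p.2 = '|' ∨ p.2 = 'S') → p.1 < (cur_line.toList.length : Int)
instance (prev_line : String) (cur_line : String) : Decidable (Pre_step prev_line cur_line) := by
  unfold Pre_step; infer_instance

def pvWitness_step : String × String := ("S|.", ".^.")

def Spec_step (prev_line : String) (cur_line : String) (out : String × Int) : Prop := out = step_alt prev_line cur_line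
instance (prev_line : String) (cur_line : String) (out : String × Int) : Decidable (Spec_step prev_line cur_line out) := by unfold Spec_step; infer_instance

-- ===== CLAIM (what is proved, stated in full; the proofs are below) =====
def Claim_equal_step : Prop := ∀ (prev_line : String) (cur_line : String), Dom_step prev_line cur_line → Pre_step prev_line cur_line → Spec_step prev_line cur_line (step prev_line cur_line)

-- ===== LEMMAS AND PROOFS =====

-- 'index i of prev_line holds a beam' / 'a beam at i splits on cur_line'
def beamB (pl : List Char) (i : Int) : Bool :=
  decide (0 ≤ i) && decide (i < (pl.length : Int)) &&
    (PySem.List.pyGetD pl i ' ' == '|' || PySem.List.pyGetD pl i ' ' == 'S')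

def splB (pl cl : List Char) (i : Int) : Bool :=
  beamB pl i && (PySem.List.pyGetD cl i ' ' == '^')

-- the character A writes at cell j
def emitC (pl cl : List Char) (j : Int) : Char :=
  if PySem.List.pyGetD cl j ' ' == '.' &&
      (beamB pl j || splB pl cl (j + 1) || splB pl cl (j - 1)) then '|'
  else PySem.List.pyGetD cl j ' '

theorem b_inv (pl cl : List Char) (k : Nat) :
    (PySem.List.pyRange 0 (k : Int) 1).foldl (stepBLoop pl cl) ([], 0, false, false, false) =
      ((PySem.List.pyRange 0 (min ((k : Int) - 1) (cl.length : Int)) 1).map (emitC pl cl),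
       ((PySem.List.pyRange 0 (k : Int) 1).map
          (fun i => if splB pl cl i then (1 : Int) else 0)).sum,
       beamB pl ((k : Int) - 1) || splB pl cl ((k : Int) - 2),
       splB pl cl ((k : Int) - 1),
       false) := by
  induction k with
  | zero =>
    simp only [Nat.cast_zero]
    have hm : min ((0 : Int) - 1) (cl.length : Int) ≤ 0 := by omega
    rw [PySem.List.pyRange_one_eq_nil (le_refl (0:Int)),
        PySem.List.pyRange_one_eq_nil hm]
    simp [beamB, splB]
  | succ k ih =>
    have hk0 : (0 : Int) ≤ (k : Int) := Int.natCast_nonneg k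
    have h1 : ((k + 1 : Nat) : Int) = (k : Int) + 1 := by push_cast; ring
    rw [h1, PySem.List.pyRange_one_succ_right hk0, List.foldl_append, ih]
    have e1 : (k : Int) + 1 - 1 = (k : Int) := by ring
    have e2 : (k : Int) + 1 - 2 = (k : Int) - 1 := by ring
    have e3 : (k : Int) - 1 - 1 = (k : Int) - 2 := by ring
    have e4 : (k : Int) - 1 + 1 = (k : Int) := by ring
    rw [e1, e2]
    simp only [List.foldl_cons, List.foldl_nil, stepBLoop, List.map_append, List.sum_append,
      List.map_cons, List.map_nil, List.sum_cons, List.sum_nil]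
    have hg : (decide ((k : Int) < (pl.length : Int)) &&
        (PySem.List.pyGetD pl (k : Int) ' ' == '|' || PySem.List.pyGetD pl (k : Int) ' ' == 'S')) =
        beamB pl (k : Int) := by
      simp [beamB, hk0]
    rw [hg]
    by_cases hout : (1 : Int) ≤ (k : Int) ∧ (k : Int) ≤ (cl.length : Int)
    · -- a cell is emitted this iteration
      have hN1 : 1 ≤ k := by omega
      have hN2 : k ≤ cl.length := by omega
      have hmin1 : min ((k : Int) - 1) (cl.length : Int) = (k : Int) - 1 := by omega
      have hmin2 : min (k : Int) (cl.length : Int) = (k : Int) := by omega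
      have hsplit : PySem.List.pyRange 0 (k : Int) 1 =
          PySem.List.pyRange 0 ((k : Int) - 1) 1 ++ [(k : Int) - 1] := by
        have := PySem.List.pyRange_one_succ_right (a := 0) (b := (k : Int) - 1) (by omega)
        simpa using this
      rw [hmin1, hmin2, hsplit, List.map_append, List.map_cons, List.map_nil]
      by_cases hc : PySem.List.pyGetD cl (k : Int) ' ' = '^'
      all_goals have hcg := hc
      all_goals simp only [PySem.List.pyGetD_natCast, List.getD_eq_getElem?_getD] at hcg
      · by_cases hbeam : beamB pl (k : Int) = true
        · have hs : splB pl cl (k : Int) = true := by simp [splB, hbeam, hc]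
          simp [hbeam, hcg, hs, hN1, hN2, emitC, e3, e4]
        · have hs : splB pl cl (k : Int) = false := by simp [splB, hbeam]
          simp [hbeam, hcg, hs, hN1, hN2, emitC, e3, e4]
      · have hs : splB pl cl (k : Int) = false := by simp [splB, hcg]
        by_cases hbeam : beamB pl (k : Int) = true
        · simp [hbeam, hcg, hs, hN1, hN2, emitC, e3, e4]
        · simp [hbeam, hcg, hs, hN1, hN2, emitC, e3, e4]
    · -- nothing emitted: the min bound is unchanged
      rw [not_and_or] at hout
      have hc0 : (0 : Int) ≤ (cl.length : Int) := Int.natCast_nonneg _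
      have hlist : PySem.List.pyRange 0 (min ((k : Int) - 1) (cl.length : Int)) 1 =
          PySem.List.pyRange 0 (min (k : Int) (cl.length : Int)) 1 := by
        rcases hout with h | h
        · rw [PySem.List.pyRange_one_eq_nil (by omega), PySem.List.pyRange_one_eq_nil (by omega)]
        · have : min ((k : Int) - 1) (cl.length : Int) = min (k : Int) (cl.length : Int) := by omega
          rw [this]
      rw [hlist]
      have houtN : 1 ≤ k → cl.length < k := by rcases hout with h | h <;> omega
      by_cases hc : PySem.List.pyGetD cl (k : Int) ' ' = '^'
      all_goals have hcg := hc
      all_goals simp only [PySem.List.pyGetD_natCast, List.getD_eq_getElem?_getD] at hcg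
      · by_cases hbeam : beamB pl (k : Int) = true
        · have hs : splB pl cl (k : Int) = true := by simp [splB, hbeam, hc]
          simpa [hbeam, hcg, hs] using houtN
        · have hs : splB pl cl (k : Int) = false := by simp [splB, hbeam]
          simpa [hbeam, hcg, hs] using houtN
      · have hs : splB pl cl (k : Int) = false := by simp [splB, hcg]
        by_cases hbeam : beamB pl (k : Int) = true
        · simpa [hbeam, hcg, hs] using houtN
        · simpa [hbeam, hcg, hs] using houtN

-- the beam indices of prev_line are pairwise distinct
theorem pv_beams_nodup (L : List (Int × Char)) (h : L.Pairwise (fun p q => p.1 < q.1)) :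
    (L.filterMap (fun p => if p.2 == '|' || p.2 == 'S' then some p.1 else none)).Nodup := by
  induction L with
  | nil => simp
  | cons p t ih =>
    rcases List.pairwise_cons.mp h with ⟨hp, ht⟩
    by_cases hf : (p.2 == '|' || p.2 == 'S') = true <;>
      simp only [List.filterMap_cons, hf, if_pos, if_neg, List.nodup_cons, Bool.not_eq_true] at *
    · refine ⟨?_, ih ht⟩
      intro hmem
      rcases List.mem_filterMap.mp hmem with ⟨q, hq, hfq⟩
      have h2 := hp q hq
      simp only at h2
      split at hfq
      · rw [Option.some_inj] at hfq; omega
      · simp at hfq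
    · exact ih ht

-- membership in A's beam-index list is the beamB predicate
theorem mem_beams_iff (pl : List Char) (x : Int) :
    x ∈ (PySem.List.enumerate pl 0).filterMap
        (fun p => if p.2 == '|' || p.2 == 'S' then some p.1 else none) ↔ beamB pl x = true := by
  simp only [List.mem_filterMap, PySem.List.mem_enumerate_iff]
  constructor
  · rintro ⟨p, ⟨k, hk, rfl⟩, hsome⟩
    simp only [zero_add] at hsome ⊢
    by_cases hb : (pl[k] == '|' || pl[k] == 'S') = true
    · rw [if_pos hb, Option.some_inj] at hsome
      subst hsome
      have hget : PySem.List.pyGetD pl ((k : Nat) : Int) ' ' = pl[k] := by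
        rw [PySem.List.pyGetD_natCast, List.getD_eq_getElem?_getD, List.getElem?_eq_getElem hk,
          Option.getD_some]
      simp [beamB, hget, hb, hk]
    · rw [if_neg hb] at hsome; simp at hsome
  · intro hb
    have h0 : 0 ≤ x := by
      by_contra h
      simp [beamB, decide_eq_true_eq] at hb
      omega
    have h1 : x < (pl.length : Int) := by
      by_contra h
      simp [beamB, decide_eq_true_eq] at hb
      omega
    have hx : x = ((x.toNat : Nat) : Int) := by omega
    have hk : x.toNat < pl.length := by omega
    refine ⟨(x, pl[x.toNat]), ⟨x.toNat, hk, by rw [zero_add]; exact Prod.ext hx rfl⟩, ?_⟩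
    have hget : PySem.List.pyGetD pl x ' ' = pl[x.toNat] := by
      conv_lhs => rw [hx]
      rw [PySem.List.pyGetD_natCast, List.getD_eq_getElem?_getD, List.getElem?_eq_getElem hk,
        Option.getD_some]
    have hchars : (pl[x.toNat] == '|' || pl[x.toNat] == 'S') = true := by
      simp only [beamB, hget, Bool.and_eq_true] at hb
      exact hb.2
    rw [if_pos hchars]

-- A's contains test computes beamB
theorem contains_beams (pl : List Char) (x : Int) :
    PySem.Set.contains (PySem.Set.ofList ((PySem.List.enumerate pl 0).filterMap
        (fun p => if p.2 == '|' || p.2 == 'S' then some p.1 else none))) x = beamB pl x := by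
  rw [Bool.eq_iff_iff, PySem.Set.contains_iff, PySem.Set.mem_ofList, mem_beams_iff]

theorem filterMap_if_some (l : List Int) (p : Int → Bool) :
    l.filterMap (fun j => if p j then some j else none) = l.filter p := by
  induction l with
  | nil => simp
  | cons a t ih => by_cases h : p a <;> simp [h, ih]

theorem sum_map_filter_int (l : List Int) (p : Int → Bool) (g : Int → Int) :
    ((l.filter p).map g).sum = (l.map (fun j => if p j then g j else 0)).sum := by
  induction l with
  | nil => simp
  | cons a t ih => by_cases h : p a <;> simp [h, ih]

-- ===== VERDICT (by name: the statement is the Claim_ definition above) =====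
theorem step_spec : Claim_equal_step := by
  intro prev cur _ _
  show step prev cur = step_alt prev cur
  simp only [step, step_alt]
  have hM : max ((prev.toList.length : Int)) ((cur.toList.length : Int)) + 1
      = ((max prev.toList.length cur.toList.length + 1 : Nat) : Int) := by push_cast; omega
  rw [hM, b_inv]
  have hnodup := pv_beams_nodup (PySem.List.enumerate prev.toList 0)
    (PySem.List.pairwise_lt_enumerate _ _)
  refine Prod.ext ?_ ?_
  · -- the new lines agree
    have hb : min (((max prev.toList.length cur.toList.length + 1 : Nat) : Int) - 1)
        (cur.toList.length : Int) = (cur.toList.length : Int) := by push_cast; omega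
    rw [hb]
    refine congrArg String.ofList ?_
    rw [PySem.List.enumerate_eq_map_pyRange cur.toList ' ', List.map_map]
    simp only [PySem.List.len_eq]
    refine List.map_congr_left ?_
    intro j _
    simp only [Function.comp, contains_beams, emitC, splB]
    rfl
  · -- the split counts agree
    rw [PySem.Set.ofList_eq_self_of_nodup _ hnodup, PySem.List.foldl_add, zero_add,
      PySem.List.enumerate_eq_map_pyRange prev.toList ' ', List.filterMap_map]
    have hfm : ((fun p : Int × Char => if p.2 == '|' || p.2 == 'S' then some p.1 else none) ∘
        fun j => (j, PySem.List.pyGetD prev.toList j ' ')) =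
        fun j => if (PySem.List.pyGetD prev.toList j ' ' == '|' ||
          PySem.List.pyGetD prev.toList j ' ' == 'S') then some j else none := rfl
    rw [hfm, filterMap_if_some, sum_map_filter_int]
    simp only [PySem.List.len_eq]
    have hsplitr : PySem.List.pyRange 0 (((max prev.toList.length cur.toList.length + 1 : Nat) : Int)) 1 =
        PySem.List.pyRange 0 (prev.toList.length : Int) 1 ++
        PySem.List.pyRange (prev.toList.length : Int)
          (((max prev.toList.length cur.toList.length + 1 : Nat) : Int)) 1 := by
      exact PySem.List.pyRange_one_append _ _ _ (Int.natCast_nonneg _) (by push_cast; omega)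
    rw [hsplitr, List.map_append, List.sum_append]
    have htail : ((PySem.List.pyRange (prev.toList.length : Int)
        (((max prev.toList.length cur.toList.length + 1 : Nat) : Int)) 1).map
          (fun i => if splB prev.toList cur.toList i then (1 : Int) else 0)).sum = 0 := by
      apply List.sum_eq_zero
      intro y hy
      rcases List.mem_map.mp hy with ⟨i, hi, rfl⟩
      rcases (PySem.List.mem_pyRange_one).mp hi with ⟨hlo, _⟩
      have hbf : beamB prev.toList i = false := by
        have hL : prev.toList.length = prev.length := by simp
        simp [beamB, decide_eq_true_eq]
        intro h; omega
      simp [splB, hbf]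
    rw [htail, add_zero]
    refine congrArg List.sum (List.map_congr_left ?_)
    intro j hj
    rcases (PySem.List.mem_pyRange_one).mp hj with ⟨hlo, hhi⟩
    have hbeq : (PySem.List.pyGetD prev.toList j ' ' == '|' ||
        PySem.List.pyGetD prev.toList j ' ' == 'S') = beamB prev.toList j := by
      have hL : prev.toList.length = prev.length := by simp
      simp [beamB, hlo]
      intro _
      omega
    rw [hbeq]
    by_cases hb : beamB prev.toList j = true
    · simp [splB, hb]
    · simp [splB, hb]
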